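-- pv_equiv track=rewrite | github.com/VladKochetov007/FPGAEnv | src/rlvr_envs/envs/fpga/tasks.py | _parity32_adler
-- ===== SOURCE A (Python) =====
-- def _parity32_adler(a: int) -> int:
--     """Tiny Adler-like rolling checksum over 4 bytes of a 32-bit word.
--     Output is {a[7:0], b[7:0]} with MOD_ADLER = 251 (small so it fits in 8b).
--     Purpose: exercise a streaming accumulate-and-reduce pipeline."""
--     MOD = 251
--     s1 = 1
--     s2 = 0
--     for i in range(4):
--         byte = (a >> (8 * i)) & 0xFF
--         s1 = (s1 + byte) % MOD
--         s2 = (s2 + s1) % MOD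
--     return ((s2 & 0xFF) << 8) | (s1 & 0xFF)
-- ===== SOURCE B (Python) =====
-- def _parity32_adler(a: int) -> int:
--     """Closed-form Adler-like checksum: no rolling loop, direct weighted sums."""
--     MOD = 251
--     b0 = a & 0xFF
--     b1 = (a >> 8) & 0xFF
--     b2 = (a >> 16) & 0xFF
--     b3 = (a >> 24) & 0xFF
--     s1 = (1 + b0 + b1 + b2 + b3) % MOD
--     s2 = (4 + 4 * b0 + 3 * b1 + 2 * b2 + b3) % MOD
--     return ((s2 & 0xFF) << 8) | (s1 & 0xFF)
-- ===== Notes on version B (the rewrite author's own statement) =====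
-- stated objective: simpler
-- what changed: Replaced the rolling s1/s2 accumulate-and-reduce loop over the word's bytes by extracting the bytes once and computing s1 and s2 as closed-form (weighted) sums with a single mod each.
import Mathlib
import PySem

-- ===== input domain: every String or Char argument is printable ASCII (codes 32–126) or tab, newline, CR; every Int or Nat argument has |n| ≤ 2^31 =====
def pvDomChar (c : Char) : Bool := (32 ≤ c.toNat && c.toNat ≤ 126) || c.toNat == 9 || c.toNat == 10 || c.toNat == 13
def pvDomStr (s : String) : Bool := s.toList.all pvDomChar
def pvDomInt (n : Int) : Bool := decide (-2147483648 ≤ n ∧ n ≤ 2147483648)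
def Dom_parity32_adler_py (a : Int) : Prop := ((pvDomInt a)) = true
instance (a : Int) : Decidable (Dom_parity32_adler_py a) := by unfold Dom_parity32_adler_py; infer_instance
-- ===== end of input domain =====

-- B replaces A's rolling s1/s2 reduction loop by a closed-form weighted sum over the
-- four bytes (objective: simpler straight-line code).

-- ===== PORT A =====
def parity32_adler_py (a : Int) : Int :=
  let st := (PySem.List.pyRange 0 4 1).foldl
    (fun (s : Int × Int) i =>
      let byte := PySem.Int.band (Int.shiftRight a (8 * i).toNat) 255
      let s1 := PySem.Int.mod (s.1 + byte) 251
      let s2 := PySem.Int.mod (s.2 + s1) 251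
      (s1, s2))
    (1, 0)
  PySem.Int.bor ((PySem.Int.band st.2 255) <<< (8 : Nat)) (PySem.Int.band st.1 255)

-- ===== PORT B =====
def parity32_adler_py_alt (a : Int) : Int :=
  let b0 := PySem.Int.band a 255
  let b1 := PySem.Int.band (Int.shiftRight a 8) 255
  let b2 := PySem.Int.band (Int.shiftRight a 16) 255
  let b3 := PySem.Int.band (Int.shiftRight a 24) 255
  let s1 := PySem.Int.mod (1 + b0 + b1 + b2 + b3) 251
  let s2 := PySem.Int.mod (4 + 4 * b0 + 3 * b1 + 2 * b2 + b3) 251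
  PySem.Int.bor ((PySem.Int.band s2 255) <<< (8 : Nat)) (PySem.Int.band s1 255)

-- ===== PRECONDITION & SPEC =====
def Spec_parity32_adler_py (a : Int) (out : Int) : Prop := out = parity32_adler_py_alt a
instance (a : Int) (out : Int) : Decidable (Spec_parity32_adler_py a out) := by unfold Spec_parity32_adler_py; infer_instance

-- ===== CLAIM (what is proved, stated in full; the proofs are below) =====
def Claim_equal_parity32_adler_py : Prop := ∀ (a : Int), Dom_parity32_adler_py a → Spec_parity32_adler_py a (parity32_adler_py a)

-- ===== LEMMAS AND PROOFS =====

-- ===== VERDICT (by name: the statement is the Claim_ definition above) =====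
theorem parity32_adler_py_spec : Claim_equal_parity32_adler_py := by
  intro a _
  unfold Spec_parity32_adler_py parity32_adler_py parity32_adler_py_alt
  have hm : ∀ x : Int, PySem.Int.mod x 251 = x % 251 :=
    fun x => PySem.Int.mod_eq_emod_of_pos (by norm_num)
  simp only [show PySem.List.pyRange 0 4 1 = [0, 1, 2, 3] from by decide, List.foldl, hm]
  norm_num
  simp only [show ∀ x : Int, Int.shiftRight x 0 = x from fun x => Int.shiftRight_zero x,
    show Int.toNat 8 = 8 from rfl, show Int.toNat 16 = 16 from rfl, show Int.toNat 24 = 24 from rfl]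
  generalize PySem.Int.band a 255 = b0
  generalize PySem.Int.band (Int.shiftRight a 8) 255 = b1
  generalize PySem.Int.band (Int.shiftRight a 16) 255 = b2
  generalize PySem.Int.band (Int.shiftRight a 24) 255 = b3
  congr 3 <;> omega
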